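-- pv_equiv track=rewrite | github.com/ramdhanhdy/resume-optimizer | backend/src/app/services/review_document.py | resume_text_to_markdown
-- ===== SOURCE A (Python) =====
-- def normalize_resume_text(resume_text: str) -> str:
--     """Normalize line endings and trim noisy leading/trailing whitespace."""
--     lines = [line.rstrip() for line in resume_text.replace("\r\n", "\n").replace("\r", "\n").split("\n")]
--
--     while lines and not lines[0].strip():
--         lines.pop(0)
--     while lines and not lines[-1].strip():
--         lines.pop()
--
--     normalized: list[str] = []
--     previous_blank = False
--     for line in lines:
--         blank = not line.strip()
--         if blank and previous_blank:
--             continue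
--         normalized.append(line)
--         previous_blank = blank
--
--     return "\n".join(normalized).strip()
--
-- def resume_text_to_markdown(resume_text: str) -> str:
--     """Best-effort markdown representation derived from plain resume text."""
--     normalized = normalize_resume_text(resume_text)
--     if not normalized:
--         return ""
--
--     lines = normalized.split("\n")
--     markdown_lines: list[str] = []
--     first_non_empty = True
--
--     for raw_line in lines:
--         line = raw_line.strip()
--         if not line:
--             markdown_lines.append("")
--             continue
--
--         if first_non_empty:
--             markdown_lines.append(f"# {line}")
--             first_non_empty = False
--             continue
--
--         if _is_section_heading(line):
--             markdown_lines.append(f"## {line.title()}")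
--             continue
--
--         if _is_bullet_line(line):
--             markdown_lines.append(f"- {_strip_bullet_prefix(line)}")
--             continue
--
--         markdown_lines.append(line)
--
--     return "\n".join(markdown_lines).strip()
--
-- def _is_section_heading(line: str) -> bool:
--     if len(line) > 60:
--         return False
--     if any(ch.isdigit() for ch in line):
--         return False
--     if "@" in line or "http" in line.lower():
--         return False
--     alpha = [ch for ch in line if ch.isalpha()]
--     return bool(alpha) and line == line.upper()
--
-- def _is_bullet_line(line: str) -> bool:
--     return line.startswith(("•", "-", "*"))
--
-- def _strip_bullet_prefix(line: str) -> str: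
--     return line[1:].strip() if _is_bullet_line(line) else line
-- ===== SOURCE B (Python) =====
-- def resume_text_to_markdown(resume_text: str) -> str:
--     """Best-effort markdown from plain resume text, in one streaming pass."""
--     out: list[str] = []
--     seen_first = False
--     pending_blank = False
--     for raw in resume_text.replace("\r\n", "\n").replace("\r", "\n").split("\n"):
--         line = raw.strip()
--         if not line:
--             if seen_first:
--                 pending_blank = True
--             continue
--         if not seen_first:
--             out.append(f"# {line}")
--             seen_first = True
--             continue
--         if pending_blank:
--             out.append("")
--             pending_blank = False
--         if _is_section_heading(line):
--             out.append(f"## {line.title()}")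
--         elif _is_bullet_line(line):
--             out.append(f"- {_strip_bullet_prefix(line)}")
--         else:
--             out.append(line)
--     return "\n".join(out).strip()
--
--
-- def _is_section_heading(line: str) -> bool:
--     if len(line) > 60:
--         return False
--     if any(ch.isdigit() for ch in line):
--         return False
--     if "@" in line or "http" in line.lower():
--         return False
--     alpha = [ch for ch in line if ch.isalpha()]
--     return bool(alpha) and line == line.upper()
--
--
-- def _is_bullet_line(line: str) -> bool:
--     return line.startswith(("•", "-", "*"))
--
--
-- def _strip_bullet_prefix(line: str) -> str:
--     return line[1:].strip() if _is_bullet_line(line) else line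
-- ===== Notes on version B (the rewrite author's own statement) =====
-- stated objective: simpler
-- what changed: B replaces A's multi-pass pipeline (rstrip every line, pop leading/trailing blanks, collapse blank runs, join, strip, re-split, classify) by one streaming pass over the split lines with a seen-first flag and a pending-blank flag, emitting each markdown line directly.
import Mathlib
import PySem

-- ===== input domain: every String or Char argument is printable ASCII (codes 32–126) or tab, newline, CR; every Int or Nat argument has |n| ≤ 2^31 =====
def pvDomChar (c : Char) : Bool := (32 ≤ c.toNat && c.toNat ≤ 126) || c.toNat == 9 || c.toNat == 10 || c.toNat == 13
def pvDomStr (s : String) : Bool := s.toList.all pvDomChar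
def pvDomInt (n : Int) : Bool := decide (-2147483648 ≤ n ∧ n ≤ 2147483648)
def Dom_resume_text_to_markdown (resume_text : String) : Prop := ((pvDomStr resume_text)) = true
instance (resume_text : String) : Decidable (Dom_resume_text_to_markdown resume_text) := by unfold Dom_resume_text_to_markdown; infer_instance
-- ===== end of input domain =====

-- B fuses A's multi-pass normalize/collapse/join/re-split pipeline into a single streaming pass
-- (seen-first flag + pending-blank flag) over the split lines; same output, one pass (objective: simpler).

-- ===== PORT A =====
-- shared helpers: the module's _is_section_heading / _is_bullet_line / _strip_bullet_prefix,
-- and str.title() ported by hand (exact for ASCII: a letter is uppercased after a non-letter,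
-- lowercased after a letter; non-letters pass through)
def pvIsSectionHeading (line : List Char) : Bool :=
  if 60 < line.length then false
  else if line.any PySem.Chars.isdigit then false
  else if PySem.Chars.isIn ['@'] line || PySem.Chars.isIn ['h','t','t','p'] (PySem.Chars.lower line) then false
  else decide (line.filter PySem.Chars.isalpha ≠ []) && (line == PySem.Chars.upper line)

def pvIsBulletLine (line : List Char) : Bool :=
  PySem.Chars.startswith line ['•'] || PySem.Chars.startswith line ['-'] || PySem.Chars.startswith line ['*']

def pvStripBulletPrefix (line : List Char) : List Char :=
  if pvIsBulletLine line then PySem.Chars.strip (PySem.Chars.slice line (some 1) none) else line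

def pvTitle (line : List Char) : List Char :=
  (line.foldl (fun (acc : List Char × Bool) c =>
      (acc.1 ++ [if PySem.Chars.isalpha c then
                   (if acc.2 then PySem.Chars.lowerChar c else PySem.Chars.upperChar c)
                 else c],
       PySem.Chars.isalpha c)) ([], false)).1

-- the loop body of normalize_resume_text's blank-collapsing loop
def pvCollapseStep (acc : List (List Char) × Bool) (line : List Char) : List (List Char) × Bool :=
  let blank := PySem.Chars.strip line == ([] : List Char)
  if blank && acc.2 then acc else (acc.1 ++ [line], blank)

-- the loop body of resume_text_to_markdown's markdown loop (acc.2 = first_non_empty)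
def pvMdStep (acc : List (List Char) × Bool) (raw : List Char) : List (List Char) × Bool :=
  let line := PySem.Chars.strip raw
  if line == ([] : List Char) then (acc.1 ++ [[]], acc.2)
  else if acc.2 then (acc.1 ++ [['#',' '] ++ line], false)
  else if pvIsSectionHeading line then (acc.1 ++ [['#','#',' '] ++ pvTitle line], acc.2)
  else if pvIsBulletLine line then (acc.1 ++ [['-',' '] ++ pvStripBulletPrefix line], acc.2)
  else (acc.1 ++ [line], acc.2)

def resume_text_to_markdown (resume_text : String) : String :=
  -- normalize_resume_text
  let lines0 := (PySem.Chars.splitOn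
      (PySem.Chars.replace (PySem.Chars.replace resume_text.toList ['\r','\n'] ['\n']) ['\r'] ['\n'])
      ['\n']).map PySem.Chars.rstrip
  -- while lines and not lines[0].strip(): lines.pop(0)
  let lines1 := lines0.dropWhile (fun l => PySem.Chars.strip l == ([] : List Char))
  -- while lines and not lines[-1].strip(): lines.pop()
  let lines2 := (lines1.reverse.dropWhile (fun l => PySem.Chars.strip l == ([] : List Char))).reverse
  let normalized := (lines2.foldl pvCollapseStep ([], false)).1
  let normStr := PySem.Chars.strip (PySem.Chars.join ['\n'] normalized)
  if normStr == ([] : List Char) then "" else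
  let lines := PySem.Chars.splitOn normStr ['\n']
  let md := (lines.foldl pvMdStep ([], true)).1
  String.mk (PySem.Chars.strip (PySem.Chars.join ['\n'] md))

-- ===== PORT B =====
-- the loop body of B's single streaming pass (acc.2.1 = seen_first, acc.2.2 = pending_blank)
def pvStreamStep (acc : List (List Char) × Bool × Bool) (raw : List Char) : List (List Char) × Bool × Bool :=
  let line := PySem.Chars.strip raw
  if line == ([] : List Char) then (acc.1, acc.2.1, if acc.2.1 then true else acc.2.2)
  else if !acc.2.1 then (acc.1 ++ [['#',' '] ++ line], true, false)
  else
    let out := if acc.2.2 then acc.1 ++ [[]] else acc.1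
    if pvIsSectionHeading line then (out ++ [['#','#',' '] ++ pvTitle line], true, false)
    else if pvIsBulletLine line then (out ++ [['-',' '] ++ pvStripBulletPrefix line], true, false)
    else (out ++ [line], true, false)

def resume_text_to_markdown_alt (resume_text : String) : String :=
  let lines := PySem.Chars.splitOn
      (PySem.Chars.replace (PySem.Chars.replace resume_text.toList ['\r','\n'] ['\n']) ['\r'] ['\n'])
      ['\n']
  let st := lines.foldl pvStreamStep ([], false, false)
  String.mk (PySem.Chars.strip (PySem.Chars.join ['\n'] st.1))

-- ===== PRECONDITION & SPEC =====
def Spec_resume_text_to_markdown (resume_text : String) (out : String) : Prop := out = resume_text_to_markdown_alt resume_text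
instance (resume_text : String) (out : String) : Decidable (Spec_resume_text_to_markdown resume_text out) := by unfold Spec_resume_text_to_markdown; infer_instance

-- ===== CLAIM (what is proved, stated in full; the proofs are below) =====
def Claim_equal_resume_text_to_markdown : Prop := ∀ (resume_text : String), Dom_resume_text_to_markdown resume_text → Spec_resume_text_to_markdown resume_text (resume_text_to_markdown resume_text)

-- ===== LEMMAS AND PROOFS =====
lemma pvDropWhile_idem {α : Type} (p : α → Bool) (l : List α) :
    List.dropWhile p (List.dropWhile p l) = List.dropWhile p l := by
  cases h : List.dropWhile p l with
  | nil => simp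
  | cons a t =>
      have hna : p a = false := by
        have := List.head_dropWhile_not p (l := l) (by simp [h])
        simpa [h] using this
      rw [List.dropWhile_cons_of_neg (by simp [hna])]

lemma pvRstrip_cons (c : Char) (t : List Char) :
    PySem.Chars.rstrip (c :: t) =
      if PySem.Chars.rstrip t = [] then (if PySem.Chars.isspace c then [] else [c])
      else c :: PySem.Chars.rstrip t := by
  unfold PySem.Chars.rstrip
  rw [List.reverse_cons, List.dropWhile_append]
  by_cases h : List.dropWhile PySem.Chars.isspace t.reverse = []
  · simp [h, List.dropWhile]
    by_cases hc : PySem.Chars.isspace c <;> simp [hc]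
  · simp [h]

lemma pvLstrip_cons_pos (c : Char) (t : List Char) (h : PySem.Chars.isspace c = true) :
    PySem.Chars.lstrip (c :: t) = PySem.Chars.lstrip t := by
  unfold PySem.Chars.lstrip; rw [List.dropWhile_cons_of_pos h]

lemma pvLstrip_cons_neg (c : Char) (t : List Char) (h : PySem.Chars.isspace c = false) :
    PySem.Chars.lstrip (c :: t) = c :: t := by
  unfold PySem.Chars.lstrip; rw [List.dropWhile_cons_of_neg (by simp [h])]

lemma pvRstrip_rstrip (l : List Char) :
    PySem.Chars.rstrip (PySem.Chars.rstrip l) = PySem.Chars.rstrip l := by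
  unfold PySem.Chars.rstrip
  rw [List.reverse_reverse, pvDropWhile_idem]

lemma pvLstrip_lstrip (l : List Char) :
    PySem.Chars.lstrip (PySem.Chars.lstrip l) = PySem.Chars.lstrip l := by
  unfold PySem.Chars.lstrip; rw [pvDropWhile_idem]

lemma pvLstrip_rstrip (l : List Char) :
    PySem.Chars.lstrip (PySem.Chars.rstrip l) = PySem.Chars.rstrip (PySem.Chars.lstrip l) := by
  induction l with
  | nil => rfl
  | cons c t ih =>
      by_cases hc : PySem.Chars.isspace c = true
      · rw [pvRstrip_cons, pvLstrip_cons_pos c t hc]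
        by_cases h0 : PySem.Chars.rstrip t = []
        · rw [if_pos h0, if_pos hc, ← ih, h0]
        · rw [if_neg h0, pvLstrip_cons_pos c _ hc, ih]
      · simp only [Bool.not_eq_true] at hc
        rw [pvRstrip_cons, pvLstrip_cons_neg c t hc]
        by_cases h0 : PySem.Chars.rstrip t = []
        · rw [if_pos h0, if_neg (by simp [hc]), pvRstrip_cons, if_pos h0, if_neg (by simp [hc]),
             pvLstrip_cons_neg c [] hc]
        · rw [if_neg h0, pvLstrip_cons_neg c _ hc, pvRstrip_cons, if_neg h0]

lemma pvStrip_rstrip (l : List Char) :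
    PySem.Chars.strip (PySem.Chars.rstrip l) = PySem.Chars.strip l := by
  unfold PySem.Chars.strip
  rw [pvLstrip_rstrip, pvRstrip_rstrip]

lemma pvStrip_strip (l : List Char) :
    PySem.Chars.strip (PySem.Chars.strip l) = PySem.Chars.strip l := by
  unfold PySem.Chars.strip
  rw [pvLstrip_rstrip, pvLstrip_lstrip, pvRstrip_rstrip]

lemma pvLstrip_append (a b : List Char) (h : PySem.Chars.lstrip a ≠ []) :
    PySem.Chars.lstrip (a ++ b) = PySem.Chars.lstrip a ++ b := by
  unfold PySem.Chars.lstrip at *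
  rw [List.dropWhile_append, if_neg (by simpa using h)]

lemma pvRstrip_append (a b : List Char) (h : PySem.Chars.rstrip b ≠ []) :
    PySem.Chars.rstrip (a ++ b) = a ++ PySem.Chars.rstrip b := by
  unfold PySem.Chars.rstrip at *
  rw [List.reverse_append, List.dropWhile_append, if_neg (by simpa using h)]
  simp

lemma pvRstrip_sublist (l : List Char) : (PySem.Chars.rstrip l).Sublist l := by
  unfold PySem.Chars.rstrip
  have h := (List.dropWhile_sublist (l := l.reverse) PySem.Chars.isspace).reverse
  simpa using h

lemma pvMem_strip (c : Char) (l : List Char) (h : c ∈ PySem.Chars.strip l) : c ∈ l := by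
  unfold PySem.Chars.strip PySem.Chars.lstrip at h
  have h1 := (pvRstrip_sublist _).mem h
  exact (List.dropWhile_sublist _).mem h1

lemma pvSplitOn_go_spec (c : Char) (fuel : Nat) (l cur : List Char) (acc : List (List Char))
    (h : l.length < fuel) :
    PySem.Chars.splitOn.go [c] fuel l cur acc
      = acc.reverse ++ (List.splitOn c l).modifyHead (cur.reverse ++ ·) := by
  induction fuel generalizing l cur acc with
  | zero => omega
  | succ fuel ih =>
      cases l with
      | nil =>
          simp [PySem.Chars.splitOn.go, List.splitOn, List.splitOnP_nil]
      | cons ch rest =>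
          rw [PySem.Chars.splitOn.go]
          by_cases hc : ch = c
          · subst hc
            rw [if_pos (by simp [List.isPrefixOf])]
            simp only [List.length_cons] at h
            rw [ih _ _ _ (by simpa using Nat.lt_of_succ_lt_succ h)]
            simp [List.splitOn, List.splitOnP_cons]
            cases List.splitOnP (fun x => x == ch) rest <;> simp
          · rw [if_neg (by simp [List.isPrefixOf, Ne.symm hc])]
            simp only [List.length_cons] at h
            rw [ih _ _ _ (Nat.lt_of_succ_lt_succ h)]
            simp only [List.splitOn, List.splitOnP_cons, beq_iff_eq, if_neg hc]
            cases hsp : List.splitOnP (fun x => x == c) rest with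
            | nil => simp
            | cons q qs => simp

lemma pvChars_splitOn_single (s : List Char) (c : Char) :
    PySem.Chars.splitOn s [c] = List.splitOn c s := by
  unfold PySem.Chars.splitOn
  rw [pvSplitOn_go_spec c _ s [] [] (by omega)]
  cases h : List.splitOn c s with
  | nil => simp
  | cons a t => simp

lemma pvNot_mem_splitOn (c : Char) (s : List Char) :
    ∀ l ∈ List.splitOn c s, c ∉ l := by
  unfold List.splitOn
  induction s with
  | nil => intro l hl; simp [List.splitOnP_nil] at hl; simp [hl]
  | cons a s ih =>
      intro l hl
      rw [List.splitOnP_cons] at hl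
      by_cases ha : a = c
      · rw [if_pos (by simp [ha])] at hl
        rcases List.mem_cons.mp hl with h | h
        · simp [h]
        · exact ih l h
      · rw [if_neg (by simp [ha])] at hl
        cases hsp : List.splitOnP (fun x => x == c) s with
        | nil => rw [hsp] at hl; simp at hl
        | cons q qs =>
            rw [hsp] at hl
            simp only [List.modifyHead_cons] at hl
            rcases List.mem_cons.mp hl with h | h
            · subst h
              intro hmem
              rcases List.mem_cons.mp hmem with h' | h'
              · exact ha h'.symm
              · exact ih q (by rw [hsp]; exact List.mem_cons_self ..) h'
            · exact ih l (by rw [hsp]; exact List.mem_cons_of_mem _ h)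

lemma pvJoin_ne_nil (parts : List (List Char)) (l : List Char)
    (h : parts.getLast? = some l) (hne : l ≠ []) :
    PySem.Chars.join ['\n'] parts ≠ [] := by
  cases parts with
  | nil => simp at h
  | cons a t =>
      cases t with
      | nil =>
          rw [PySem.Chars.join_singleton]
          simp at h; subst h; exact hne
      | cons b t' => rw [PySem.Chars.join_cons_cons]; simp

lemma pvRstrip_join (parts : List (List Char)) (l : List Char)
    (h : parts.getLast? = some l) (hr : PySem.Chars.rstrip l = l) (hne : l ≠ []) :
    PySem.Chars.rstrip (PySem.Chars.join ['\n'] parts) = PySem.Chars.join ['\n'] parts := by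
  induction parts with
  | nil => simp at h
  | cons a t ih =>
      cases t with
      | nil =>
          rw [PySem.Chars.join_singleton]
          simp at h; subst h; exact hr
      | cons b t' =>
          rw [List.getLast?_cons_cons] at h
          have hj := ih h
          have hjne : PySem.Chars.join ['\n'] (b :: t') ≠ [] := pvJoin_ne_nil _ l h hne
          rw [PySem.Chars.join_cons_cons, List.append_assoc]
          rw [pvRstrip_append]
          · rw [show (['\n'] ++ PySem.Chars.join ['\n'] (b :: t') : List Char)
                = '\n' :: PySem.Chars.join ['\n'] (b :: t') from rfl, pvRstrip_cons, hj, if_neg hjne]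
          · rw [show (['\n'] ++ PySem.Chars.join ['\n'] (b :: t') : List Char)
                = '\n' :: PySem.Chars.join ['\n'] (b :: t') from rfl, pvRstrip_cons, hj, if_neg hjne]
            simp
-- list-level machinery
def pvBlank (l : List Char) : Bool := PySem.Chars.strip l == ([] : List Char)

def pvRender (x : List Char) : List Char :=
  if pvIsSectionHeading x then ['#','#',' '] ++ pvTitle x
  else if pvIsBulletLine x then ['-',' '] ++ pvStripBulletPrefix x
  else x

def pvDropTrail (ls : List (List Char)) : List (List Char) :=
  (ls.reverse.dropWhile pvBlank).reverse

def pvCollapseRec : Bool → List (List Char) → List (List Char)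
  | _, [] => []
  | p, l :: ls => if pvBlank l && p then pvCollapseRec p ls else l :: pvCollapseRec (pvBlank l) ls

def pvMdRec : Bool → List (List Char) → List (List Char)
  | _, [] => []
  | first, l :: ls =>
      if pvBlank l then [] :: pvMdRec first ls
      else if first then (['#',' '] ++ PySem.Chars.strip l) :: pvMdRec false ls
      else pvRender (PySem.Chars.strip l) :: pvMdRec false ls

def pvStreamRec : Bool → Bool → List (List Char) → List (List Char)
  | _, _, [] => []
  | seen, pending, l :: ls =>
      if pvBlank l then pvStreamRec seen (if seen then true else pending) ls
      else if !seen then (['#',' '] ++ PySem.Chars.strip l) :: pvStreamRec true false ls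
      else (if pending then [[]] else []) ++ pvRender (PySem.Chars.strip l) :: pvStreamRec true false ls

lemma pvBlank_rstrip (l : List Char) : pvBlank (PySem.Chars.rstrip l) = pvBlank l := by
  simp [pvBlank, pvStrip_rstrip]

lemma pvBlank_strip (l : List Char) : pvBlank (PySem.Chars.strip l) = pvBlank l := by
  simp [pvBlank, pvStrip_strip]

lemma pvRstrip_ne_nil_of_not_blank (l : List Char) (h : pvBlank l = false) :
    PySem.Chars.rstrip l ≠ [] := by
  intro h0
  have hs : PySem.Chars.strip l = [] := by rw [← pvStrip_rstrip l, h0]; rfl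
  simp [pvBlank, hs] at h

lemma pvFoldl_collapse (ls : List (List Char)) (acc : List (List Char)) (p : Bool) :
    (ls.foldl pvCollapseStep (acc, p)).1 = acc ++ pvCollapseRec p ls := by
  induction ls generalizing acc p with
  | nil => simp [pvCollapseRec]
  | cons l ls ih =>
      simp only [List.foldl_cons]
      by_cases h : (pvBlank l && p) = true
      · rw [show pvCollapseStep (acc, p) l = (acc, p) by
          simp only [pvCollapseStep, pvBlank] at *; rw [if_pos (by simpa [pvBlank] using h)]]
        rw [ih, pvCollapseRec, if_pos h]
      · rw [show pvCollapseStep (acc, p) l = (acc ++ [l], pvBlank l) by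
          simp only [pvCollapseStep, pvBlank] at *; rw [if_neg (by simpa [pvBlank] using h)]]
        rw [ih, pvCollapseRec, if_neg h, List.append_assoc]
        rfl

lemma pvFoldl_md (ls : List (List Char)) (acc : List (List Char)) (first : Bool) :
    (ls.foldl pvMdStep (acc, first)).1 = acc ++ pvMdRec first ls := by
  induction ls generalizing acc first with
  | nil => simp [pvMdRec]
  | cons l ls ih =>
      simp only [List.foldl_cons]
      by_cases hb : pvBlank l = true
      · rw [show pvMdStep (acc, first) l = (acc ++ [[]], first) by
          simp only [pvMdStep]; rw [if_pos (by simpa [pvBlank] using hb)]]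
        rw [ih, pvMdRec, if_pos hb, List.append_assoc]; rfl
      · have hb' : (PySem.Chars.strip l == ([] : List Char)) = false := by
          simpa [pvBlank] using hb
        by_cases hf : first = true
        · rw [show pvMdStep (acc, first) l = (acc ++ [['#',' '] ++ PySem.Chars.strip l], false) by
            simp only [pvMdStep]; rw [if_neg (by simp [hb']), if_pos hf]]
          rw [ih, pvMdRec, if_neg (by simp [hb]), if_pos hf, List.append_assoc]; rfl
        · simp only [Bool.not_eq_true] at hf
          rw [show pvMdStep (acc, first) l = (acc ++ [pvRender (PySem.Chars.strip l)], first) by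
            simp only [pvMdStep, pvRender]; rw [if_neg (by simp [hb']), if_neg (by simp [hf])]
            subst hf; split_ifs <;> rfl]
          rw [ih, pvMdRec, if_neg (by simp [hb]), if_neg (by simp [hf]), hf, List.append_assoc]
          rfl


lemma pvFoldl_stream (ls : List (List Char)) (acc : List (List Char)) (seen pending : Bool) :
    (ls.foldl pvStreamStep (acc, seen, pending)).1 = acc ++ pvStreamRec seen pending ls := by
  induction ls generalizing acc seen pending with
  | nil => simp [pvStreamRec]
  | cons l ls ih =>
      simp only [List.foldl_cons]
      by_cases hb : pvBlank l = true
      · rw [show pvStreamStep (acc, seen, pending) l = (acc, seen, if seen then true else pending) by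
          simp only [pvStreamStep]; rw [if_pos (by simpa [pvBlank] using hb)]]
        rw [ih, pvStreamRec, if_pos hb]
      · have hb' : (PySem.Chars.strip l == ([] : List Char)) = false := by
          simpa [pvBlank] using hb
        have hbf : pvBlank l = false := by simpa using hb
        cases seen with
        | false =>
            rw [show pvStreamStep (acc, false, pending) l
                = (acc ++ [['#',' '] ++ PySem.Chars.strip l], true, false) by
              simp only [pvStreamStep]
              rw [if_neg (by simp [hb']), if_pos (show (!false) = true from rfl)]]
            rw [ih, pvStreamRec]
            simp [hbf]
        | true =>
            rw [show pvStreamStep (acc, true, pending) l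
                = ((if pending then acc ++ [[]] else acc) ++ [pvRender (PySem.Chars.strip l)], true, false) by
              simp only [pvStreamStep, pvRender]
              rw [if_neg (by simp [hb']), if_neg (show ¬((!true) = true) by simp)]
              split_ifs <;> rfl]
            rw [ih, pvStreamRec]
            simp only [hbf]
            cases pending <;> simp

lemma pvDropTrail_cons_nonblank (x : List Char) (r : List (List Char)) (h : pvBlank x = false) :
    pvDropTrail (x :: r) = x :: pvDropTrail r := by
  unfold pvDropTrail
  rw [List.reverse_cons, List.dropWhile_append]
  by_cases h0 : List.dropWhile pvBlank r.reverse = []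
  · simp [h0, List.dropWhile, h]
  · simp [h0]

lemma pvDropTrail_cons_blank (x : List Char) (r : List (List Char)) (h : pvBlank x = true) :
    pvDropTrail (x :: r) = if pvDropTrail r = [] then [] else x :: pvDropTrail r := by
  unfold pvDropTrail
  rw [List.reverse_cons, List.dropWhile_append]
  by_cases h0 : List.dropWhile pvBlank r.reverse = []
  · simp [h0, List.dropWhile, h]
  · simp [h0]

lemma pvMem_dropTrail (l : List Char) (r : List (List Char)) (h : l ∈ pvDropTrail r) : l ∈ r := by
  unfold pvDropTrail at h
  have := (List.dropWhile_sublist (l := r.reverse) pvBlank).mem (List.mem_reverse.mp h)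
  exact List.mem_reverse.mp this

lemma pvDropTrail_getLast (r : List (List Char)) (h : pvDropTrail r ≠ []) :
    ∃ l, (pvDropTrail r).getLast? = some l ∧ pvBlank l = false := by
  unfold pvDropTrail at *
  set w := List.dropWhile pvBlank r.reverse with hw
  have hwne : w ≠ [] := by intro h0; rw [h0] at h; simp at h
  refine ⟨w.head hwne, ?_, ?_⟩
  · rw [List.getLast?_reverse, List.head?_eq_head]
  · exact List.head_dropWhile_not pvBlank hwne

lemma pvMem_collapse (l : List Char) (p : Bool) (ys : List (List Char))
    (h : l ∈ pvCollapseRec p ys) : l ∈ ys := by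
  induction ys generalizing p with
  | nil => simp [pvCollapseRec] at h
  | cons y ys ih =>
      rw [pvCollapseRec] at h
      split_ifs at h with h1
      · exact List.mem_cons_of_mem _ (ih _ h)
      · rcases List.mem_cons.mp h with h2 | h2
        · simp [h2]
        · exact List.mem_cons_of_mem _ (ih _ h2)

lemma pvCollapse_map_rstrip (p : Bool) (ys : List (List Char)) :
    pvCollapseRec p (ys.map PySem.Chars.rstrip) = (pvCollapseRec p ys).map PySem.Chars.rstrip := by
  induction ys generalizing p with
  | nil => simp [pvCollapseRec]
  | cons y ys ih =>
      simp only [List.map_cons, pvCollapseRec, pvBlank_rstrip]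
      by_cases h : (pvBlank y && p) = true
      · rw [if_pos h, if_pos h, ih]
      · rw [if_neg h, if_neg h, ih]
        simp

lemma pvCollapse_getLast (ys : List (List Char)) (p : Bool) (l : List Char)
    (h : ys.getLast? = some l) (hb : pvBlank l = false) :
    (pvCollapseRec p ys).getLast? = some l := by
  induction ys generalizing p with
  | nil => simp at h
  | cons y ys ih =>
      cases ys with
      | nil =>
          simp at h
          subst h
          rw [pvCollapseRec, if_neg (by simp [hb])]
          simp [pvCollapseRec]
      | cons b t =>
          rw [List.getLast?_cons_cons] at h
          rw [pvCollapseRec]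
          split_ifs with h1
          · exact ih _ h
          · have hrec := ih (pvBlank y) h
            cases hc : pvCollapseRec (pvBlank y) (b :: t) with
            | nil => rw [hc] at hrec; simp at hrec
            | cons q qs =>
                rw [hc] at hrec
                rw [List.getLast?_cons_cons]
                exact hrec

lemma pvMd_map_rstrip (first : Bool) (ys : List (List Char)) :
    pvMdRec first (ys.map PySem.Chars.rstrip) = pvMdRec first ys := by
  induction ys generalizing first with
  | nil => simp [pvMdRec]
  | cons y ys ih =>
      simp only [List.map_cons, pvMdRec, pvBlank_rstrip, pvStrip_rstrip]
      split_ifs <;> rw [ih]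


lemma pvStreamRec_cons_blank (seen pending : Bool) (l : List Char) (ls : List (List Char))
    (h : pvBlank l = true) :
    pvStreamRec seen pending (l :: ls) = pvStreamRec seen (if seen then true else pending) ls := by
  rw [pvStreamRec, if_pos h]

lemma pvStreamRec_cons_unseen (pending : Bool) (l : List Char) (ls : List (List Char))
    (h : pvBlank l = false) :
    pvStreamRec false pending (l :: ls)
      = (['#',' '] ++ PySem.Chars.strip l) :: pvStreamRec true false ls := by
  rw [pvStreamRec, if_neg (by simp [h]), if_pos (show (!false) = true from rfl)]

lemma pvStreamRec_cons_seen (pending : Bool) (l : List Char) (ls : List (List Char))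
    (h : pvBlank l = false) :
    pvStreamRec true pending (l :: ls)
      = (if pending then [[]] else []) ++ pvRender (PySem.Chars.strip l) :: pvStreamRec true false ls := by
  rw [pvStreamRec, if_neg (by simp [h]), if_neg (show ¬((!true) = true) by simp)]

lemma pvCollapseRec_cons (p : Bool) (l : List Char) (ls : List (List Char)) :
    pvCollapseRec p (l :: ls)
      = if pvBlank l && p then pvCollapseRec p ls else l :: pvCollapseRec (pvBlank l) ls := by
  rw [pvCollapseRec]

lemma pvMdRec_cons_blank (first : Bool) (l : List Char) (ls : List (List Char))
    (h : pvBlank l = true) :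
    pvMdRec first (l :: ls) = [] :: pvMdRec first ls := by
  rw [pvMdRec, if_pos h]

lemma pvMdRec_cons_first (l : List Char) (ls : List (List Char)) (h : pvBlank l = false) :
    pvMdRec true (l :: ls) = (['#',' '] ++ PySem.Chars.strip l) :: pvMdRec false ls := by
  rw [pvMdRec, if_neg (by simp [h]), if_pos rfl]

lemma pvMdRec_cons_rest (l : List Char) (ls : List (List Char)) (h : pvBlank l = false) :
    pvMdRec false (l :: ls) = pvRender (PySem.Chars.strip l) :: pvMdRec false ls := by
  rw [pvMdRec, if_neg (by simp [h]), if_neg (by simp)]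

lemma pvStream_unseen (ls : List (List Char)) (p : Bool) :
    pvStreamRec false p ls = pvStreamRec false false (ls.dropWhile pvBlank) := by
  induction ls generalizing p with
  | nil => rfl
  | cons l ls ih =>
      by_cases hb : pvBlank l = true
      · rw [pvStreamRec_cons_blank _ _ _ _ hb, List.dropWhile_cons_of_pos hb]
        exact ih p
      · have h1 : pvBlank l = false := by simpa using hb
        rw [List.dropWhile_cons_of_neg (by simp [hb]),
           pvStreamRec_cons_unseen _ _ _ h1, pvStreamRec_cons_unseen _ _ _ h1]

lemma pvCore (r : List (List Char)) :
    pvStreamRec true false r = pvMdRec false (pvCollapseRec false (pvDropTrail r))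
    ∧ pvStreamRec true true r
      = (if pvDropTrail r = [] then []
         else [] :: pvMdRec false (pvCollapseRec true (pvDropTrail r))) := by
  induction r with
  | nil => simp [pvStreamRec, pvDropTrail, pvMdRec, pvCollapseRec]
  | cons x r ih =>
      by_cases hb : pvBlank x = true
      · have hdt := pvDropTrail_cons_blank x r hb
        constructor
        · rw [pvStreamRec_cons_blank _ _ _ _ hb,
             show (if true then true else false) = true from rfl, ih.2, hdt]
          by_cases h0 : pvDropTrail r = []
          · simp [h0, pvCollapseRec, pvMdRec]
          · rw [if_neg h0, if_neg h0, pvCollapseRec_cons, if_neg (by simp [hb]), hb,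
               pvMdRec_cons_blank _ _ _ hb]
        · rw [pvStreamRec_cons_blank _ _ _ _ hb,
             show (if true then true else true) = true from rfl, ih.2, hdt]
          by_cases h0 : pvDropTrail r = []
          · simp [h0]
          · rw [if_neg h0, if_neg (by simp [h0]), if_neg h0, pvCollapseRec_cons,
               if_pos (by simp [hb])]
      · have hb' : pvBlank x = false := by simpa using hb
        have hdt := pvDropTrail_cons_nonblank x r hb'
        constructor
        · rw [pvStreamRec_cons_seen _ _ _ hb', if_neg (by simp), ih.1, hdt,
             pvCollapseRec_cons, if_neg (by simp [hb']), pvMdRec_cons_rest _ _ hb', hb']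
          rfl
        · rw [pvStreamRec_cons_seen _ _ _ hb', if_pos rfl, ih.1, hdt,
             if_neg (by simp), pvCollapseRec_cons, if_neg (by simp [hb']),
             pvMdRec_cons_rest _ _ hb', hb']
          rfl

lemma pvJoin_eq_intercalate (sep : List Char) (parts : List (List Char)) :
    PySem.Chars.join sep parts = sep.intercalate parts := rfl

lemma pvStrip_eq (l : List Char) :
    PySem.Chars.strip l = PySem.Chars.rstrip (PySem.Chars.lstrip l) := rfl

lemma pvHead_dropWhile {α : Type} (p : α → Bool) (l : List α) (x : α) (r : List α)
    (h : l.dropWhile p = x :: r) : p x = false := by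
  have h2 := pvDropWhile_idem p l
  rw [h] at h2
  by_cases hp : p x = true
  · rw [List.dropWhile_cons_of_pos hp] at h2
    have h3 := congrArg List.length h2
    have h4 := (List.dropWhile_sublist (l := r) p).length_le
    simp at h3
    omega
  · simpa using hp

lemma pvDropTrail_map_rstrip (ls : List (List Char)) :
    pvDropTrail (ls.map PySem.Chars.rstrip) = (pvDropTrail ls).map PySem.Chars.rstrip := by
  unfold pvDropTrail
  rw [← List.map_reverse, List.dropWhile_map,
     show (pvBlank ∘ PySem.Chars.rstrip) = pvBlank from funext pvBlank_rstrip, ← List.map_reverse]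

lemma pvIntercalate_singleton (a : List Char) : ['\n'].intercalate [a] = a := by
  simp [List.intercalate]

lemma pvMainCore (L : List (List Char)) (hN : ∀ l ∈ L, ('\n' : Char) ∉ l) :
    (let lines0 := L.map PySem.Chars.rstrip
     let lines1 := lines0.dropWhile (fun l => PySem.Chars.strip l == ([] : List Char))
     let lines2 := (lines1.reverse.dropWhile (fun l => PySem.Chars.strip l == ([] : List Char))).reverse
     let normalized := (lines2.foldl pvCollapseStep ([], false)).1
     let normStr := PySem.Chars.strip (PySem.Chars.join ['\n'] normalized)
     if normStr == ([] : List Char) then "" else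
     let lines := PySem.Chars.splitOn normStr ['\n']
     let md := (lines.foldl pvMdStep ([], true)).1
     String.mk (PySem.Chars.strip (PySem.Chars.join ['\n'] md)))
    = String.mk (PySem.Chars.strip (PySem.Chars.join ['\n']
        (L.foldl pvStreamStep ([], false, false)).1)) := by
  have hblam : (fun l => PySem.Chars.strip l == ([] : List Char)) = pvBlank := rfl
  simp only [hblam, pvFoldl_collapse, pvFoldl_stream, List.nil_append]
  have hdw : (L.map PySem.Chars.rstrip).dropWhile pvBlank
      = (L.dropWhile pvBlank).map PySem.Chars.rstrip := by
    rw [List.dropWhile_map,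
       show (pvBlank ∘ PySem.Chars.rstrip) = pvBlank from funext pvBlank_rstrip]
  rw [hdw, pvStream_unseen L false]
  cases hD : L.dropWhile pvBlank with
  | nil =>
      simp only [List.map_nil, List.reverse_nil, List.dropWhile_nil]
      rw [show pvCollapseRec false [] = [] from rfl, PySem.Chars.join_nil]
      rw [if_pos (by rfl), show pvStreamRec false false [] = [] from rfl, PySem.Chars.join_nil]
      rfl
  | cons x r =>
      have hx : pvBlank x = false := pvHead_dropWhile _ _ _ _ hD
      have hxs : PySem.Chars.strip x ≠ [] := by simpa [pvBlank] using hx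
      have hsx : pvBlank (PySem.Chars.strip x) = false := by rw [pvBlank_strip]; exact hx
      have hT2 : ((((x :: r).map PySem.Chars.rstrip).reverse.dropWhile pvBlank).reverse)
          = (x :: pvDropTrail r).map PySem.Chars.rstrip := by
        rw [show (((x :: r).map PySem.Chars.rstrip).reverse.dropWhile pvBlank).reverse
            = pvDropTrail ((x :: r).map PySem.Chars.rstrip) from rfl,
           pvDropTrail_map_rstrip, pvDropTrail_cons_nonblank x r hx]
      rw [hT2]
      have hC : pvCollapseRec false ((x :: pvDropTrail r).map PySem.Chars.rstrip)
          = PySem.Chars.rstrip x :: (pvCollapseRec false (pvDropTrail r)).map PySem.Chars.rstrip := by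
        rw [List.map_cons, pvCollapseRec_cons, if_neg (by simp [pvBlank_rstrip, hx]),
           pvBlank_rstrip, hx, pvCollapse_map_rstrip]
      rw [hC]
      -- membership facts
      have hxL : x ∈ L := by
        have : x ∈ L.dropWhile pvBlank := by rw [hD]; exact List.mem_cons_self ..
        exact (List.dropWhile_sublist _).mem this
      have hmemL : ∀ t, t ∈ pvCollapseRec false (pvDropTrail r) → t ∈ L := by
        intro t ht
        have h1 := pvMem_dropTrail _ _ (pvMem_collapse _ _ _ ht)
        have h2 : t ∈ L.dropWhile pvBlank := by rw [hD]; exact List.mem_cons_of_mem _ h1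
        exact (List.dropWhile_sublist _).mem h2
      -- B side
      rw [pvStreamRec_cons_unseen _ _ _ hx, (pvCore r).1]
      cases hT : pvCollapseRec false (pvDropTrail r) with
      | nil =>
          simp only [List.map_nil]
          rw [PySem.Chars.join_singleton, pvStrip_rstrip]
          rw [if_neg (by simpa using hxs)]
          have hsplit1 : PySem.Chars.splitOn (PySem.Chars.strip x) ['\n'] = [PySem.Chars.strip x] := by
            rw [pvChars_splitOn_single]
            have := List.splitOn_intercalate [PySem.Chars.strip x] '\n'
              (by intro l hl; simp at hl; subst hl
                  intro hc; exact (hN x hxL) (pvMem_strip _ _ hc)) (by simp)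
            rw [pvIntercalate_singleton] at this
            exact this
          rw [hsplit1, pvFoldl_md, List.nil_append,
             pvMdRec_cons_first _ _ hsx, pvStrip_strip,
             show pvMdRec false [] = [] from rfl]
      | cons t0 ts =>
          have hDTne : pvDropTrail r ≠ [] := by
            intro h0; rw [h0] at hT; simp [pvCollapseRec] at hT
          obtain ⟨l1, hl1last, hl1b⟩ := pvDropTrail_getLast r hDTne
          have hTlast : (pvCollapseRec false (pvDropTrail r)).getLast? = some l1 :=
            pvCollapse_getLast _ _ _ hl1last hl1b
          rw [hT] at hTlast
          have hrl1 : PySem.Chars.rstrip l1 ≠ [] := pvRstrip_ne_nil_of_not_blank _ hl1b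
          have hwlast : ((t0 :: ts).map PySem.Chars.rstrip).getLast? = some (PySem.Chars.rstrip l1) := by
            rw [List.getLast?_map, hTlast]; rfl
          -- strip (join (rstrip x :: map rstrip (t0::ts))) = join (strip x :: map rstrip (t0::ts))
          have hjoin : PySem.Chars.strip (PySem.Chars.join ['\n']
                (PySem.Chars.rstrip x :: (t0 :: ts).map PySem.Chars.rstrip))
              = PySem.Chars.join ['\n']
                (PySem.Chars.strip x :: (t0 :: ts).map PySem.Chars.rstrip) := by
            rw [List.map_cons, PySem.Chars.join_cons_cons, pvStrip_eq]
            rw [List.append_assoc]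
            rw [pvLstrip_append _ _ (by
              rw [pvLstrip_rstrip, ← pvStrip_eq]; exact hxs)]
            rw [pvLstrip_rstrip, ← pvStrip_eq]
            rw [← List.append_assoc, ← PySem.Chars.join_cons_cons, ← List.map_cons]
            apply pvRstrip_join _ (PySem.Chars.rstrip l1)
            · rw [List.map_cons, List.getLast?_cons_cons, ← List.map_cons, hwlast]
            · exact pvRstrip_rstrip l1
            · exact hrl1
          rw [List.map_cons] at hjoin ⊢
          rw [hjoin]
          have hNne : PySem.Chars.join ['\n']
              (PySem.Chars.strip x :: PySem.Chars.rstrip t0 :: ts.map PySem.Chars.rstrip) ≠ [] := by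
            rw [PySem.Chars.join_cons_cons]; simp
          rw [if_neg (by simpa using hNne)]
          have hparts : ∀ l ∈ PySem.Chars.strip x :: PySem.Chars.rstrip t0 :: ts.map PySem.Chars.rstrip,
              ('\n' : Char) ∉ l := by
            intro l hl
            rcases List.mem_cons.mp hl with h1 | h1
            · subst h1; intro hc; exact (hN x hxL) (pvMem_strip _ _ hc)
            · rw [show (PySem.Chars.rstrip t0 :: ts.map PySem.Chars.rstrip)
                  = (t0 :: ts).map PySem.Chars.rstrip from rfl] at h1
              obtain ⟨t, ht, rfl⟩ := List.mem_map.mp h1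
              intro hc
              have htL : t ∈ L := hmemL t (by rw [hT]; exact ht)
              exact (hN t htL) ((pvRstrip_sublist t).mem hc)
          have hsplit : PySem.Chars.splitOn (PySem.Chars.join ['\n']
                (PySem.Chars.strip x :: PySem.Chars.rstrip t0 :: ts.map PySem.Chars.rstrip)) ['\n']
              = PySem.Chars.strip x :: PySem.Chars.rstrip t0 :: ts.map PySem.Chars.rstrip := by
            rw [pvChars_splitOn_single, pvJoin_eq_intercalate]
            exact List.splitOn_intercalate _ '\n' hparts (by simp)
          rw [hsplit, pvFoldl_md, List.nil_append, pvMdRec_cons_first _ _ hsx, pvStrip_strip]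
          rw [show (PySem.Chars.rstrip t0 :: ts.map PySem.Chars.rstrip)
              = ((t0 :: ts).map PySem.Chars.rstrip) from rfl, pvMd_map_rstrip]

theorem pvMain (s : String) : resume_text_to_markdown s = resume_text_to_markdown_alt s := by
  unfold resume_text_to_markdown resume_text_to_markdown_alt
  exact pvMainCore _ (by
    rw [pvChars_splitOn_single]
    exact pvNot_mem_splitOn '\n' _)

-- ===== VERDICT (by name: the statement is the Claim_ definition above) =====
theorem resume_text_to_markdown_spec : Claim_equal_resume_text_to_markdown := by
  intro s _
  unfold Spec_resume_text_to_markdown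
  exact pvMain s
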